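-- pv_equiv track=rewrite | github.com/MurtyShikhar/Pushdown-Layers | data_utils/text_helpers.py | get_constituents
-- ===== SOURCE A (Python) =====
-- def get_constituents(penalty_matrix, attachment_labels):
--     """
--     At each point what are the current constituents in the stack?
--     Represent the constituent as a list of indices that are part of the constituent.
--
--     Example:
--     if the input_str is "a b c d" and the parse is "((a b) (c d))", then the stack labels are
--     [0, 0, 2, 1] and the penalty matrix is [[0, 0, 0, 0], [0, 0, 0, 0], [1, 1, 0, 0], [1, 1, 0, 0]]
--
--     At the first step, the constituents are [0]
--     At the second step, the constituents are [[0, 1]]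
--     At the third step, the constituents are [[0, 1], [2]]
--     Finally, the constituents are [[0, 1], [2, 3]]
--
--     Once we have these constituents we can replace stack labels with a one hot instead, so that the model may
--     choose its own headwords for a given constituent.
--     """
--
--     num_words = len(attachment_labels)
--     constituents = []
--     curr_constituent = []
--     for i in range(num_words):
--         if penalty_matrix[i][i] == 1:
--             curr_constituent.append(i)
--         else:
--             curr_constituent.append(i)
--             constituents.append(curr_constituent)
--             curr_constituent = []
--
--     return constituents
-- ===== SOURCE B (Python) =====
-- def get_constituents(penalty_matrix, attachment_labels):
--     # Two-pass decomposition: collect boundary indices (diagonal != 1), then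
--     # cut [0..) into segments at those boundaries; a trailing open group is
--     # naturally never emitted (as in A).
--     boundaries = [i for i in range(len(attachment_labels)) if penalty_matrix[i][i] != 1]
--     result = []
--     start = 0
--     for b in boundaries:
--         result.append(list(range(start, b + 1)))
--         start = b + 1
--     return result
-- ===== Notes on version B (the rewrite author's own statement) =====
-- stated objective: alternative
-- what changed: Replaces the single stateful loop carrying a growing current-constituent list with a two-pass decomposition: first collect boundary indices where the diagonal is not 1, then emit each segment as a range between consecutive boundaries.
import Mathlib
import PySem

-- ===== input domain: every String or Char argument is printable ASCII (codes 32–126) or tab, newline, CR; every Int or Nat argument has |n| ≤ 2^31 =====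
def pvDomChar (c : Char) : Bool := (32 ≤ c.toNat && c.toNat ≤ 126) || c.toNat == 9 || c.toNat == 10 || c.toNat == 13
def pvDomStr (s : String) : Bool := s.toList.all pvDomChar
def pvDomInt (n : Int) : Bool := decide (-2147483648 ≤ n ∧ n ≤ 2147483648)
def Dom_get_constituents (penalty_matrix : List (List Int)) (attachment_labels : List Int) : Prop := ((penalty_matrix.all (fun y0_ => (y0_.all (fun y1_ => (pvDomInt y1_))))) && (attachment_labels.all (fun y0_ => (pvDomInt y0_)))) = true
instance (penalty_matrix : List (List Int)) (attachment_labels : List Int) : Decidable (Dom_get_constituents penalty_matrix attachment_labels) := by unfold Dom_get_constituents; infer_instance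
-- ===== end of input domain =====

-- B replaces A's single stateful loop by a two-pass decomposition (collect boundary indices, then emit range segments); same cost, alternative structure.


-- shared indexing helper: penalty_matrix[i][i]; `getD` defaults never fire under Pre_ (in-range)
def pvDiag (pm : List (List Int)) (i : Int) : Int :=
  PySem.List.pyGetD (PySem.List.pyGetD pm i []) i 0

-- ===== PORT A =====
def get_constituents (penalty_matrix : List (List Int)) (attachment_labels : List Int) : List (List Int) :=
  let num_words : Int := attachment_labels.length
  let st := (PySem.List.pyRange 0 num_words 1).foldl
    (fun (st : List (List Int) × List Int) i =>
      if pvDiag penalty_matrix i = 1 then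
        (st.1, st.2 ++ [i])
      else
        (st.1 ++ [st.2 ++ [i]], []))
    ([], [])
  st.1

-- ===== PORT B =====
def get_constituents_alt (penalty_matrix : List (List Int)) (attachment_labels : List Int) : List (List Int) :=
  let boundaries := (PySem.List.pyRange 0 (attachment_labels.length : Int) 1).filter
    (fun i => pvDiag penalty_matrix i ≠ 1)
  let st := boundaries.foldl
    (fun (st : List (List Int) × Int) b =>
      (st.1 ++ [PySem.List.pyRange st.2 (b + 1) 1], b + 1))
    ([], 0)
  st.1

-- ===== PRECONDITION & SPEC =====
-- Pre_: Python A indexes penalty_matrix[i][i] for each i < len(attachment_labels);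
-- it raises IndexError when the matrix (or a row) is too short, so exactly those inputs are excluded.
def Pre_get_constituents (penalty_matrix : List (List Int)) (attachment_labels : List Int) : Prop :=
  ∀ i ∈ List.range attachment_labels.length,
    i < penalty_matrix.length ∧ i < (penalty_matrix.getD i []).length
instance (penalty_matrix : List (List Int)) (attachment_labels : List Int) : Decidable (Pre_get_constituents penalty_matrix attachment_labels) := by unfold Pre_get_constituents; infer_instance

def pvWitness_get_constituents : List (List Int) × List Int :=
  ([[0, 0, 0, 0], [0, 0, 0, 0], [1, 1, 0, 0], [1, 1, 0, 0]], [0, 0, 2, 1])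

def Spec_get_constituents (penalty_matrix : List (List Int)) (attachment_labels : List Int) (out : List (List Int)) : Prop := out = get_constituents_alt penalty_matrix attachment_labels
instance (penalty_matrix : List (List Int)) (attachment_labels : List Int) (out : List (List Int)) : Decidable (Spec_get_constituents penalty_matrix attachment_labels out) := by unfold Spec_get_constituents; infer_instance

-- ===== CLAIM (what is proved, stated in full; the proofs are below) =====
def Claim_equal_get_constituents : Prop := ∀ (penalty_matrix : List (List Int)) (attachment_labels : List Int), Dom_get_constituents penalty_matrix attachment_labels → Pre_get_constituents penalty_matrix attachment_labels → Spec_get_constituents penalty_matrix attachment_labels (get_constituents penalty_matrix attachment_labels)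

-- ===== LEMMAS AND PROOFS =====

-- appending the next index extends a contiguous range by one
theorem pvRange_snoc (s a : Int) (h : s ≤ a) :
    PySem.List.pyRange s a 1 ++ [a] = PySem.List.pyRange s (a + 1) 1 :=
  (PySem.List.pyRange_one_succ_right h).symm

-- main invariant: A's fold from (cons, [s..a)) equals B's fold over the filtered
-- remaining indices from (cons, s), for any window [a..b) of indices.
theorem pvMain (pm : List (List Int)) (b : Int) : ∀ (a s : Int), s ≤ a →
    ((PySem.List.pyRange a b 1).foldl
      (fun (st : List (List Int) × List Int) i =>
        if pvDiag pm i = 1 then (st.1, st.2 ++ [i])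
        else (st.1 ++ [st.2 ++ [i]], [])) (cons, PySem.List.pyRange s a 1)).1
    = (((PySem.List.pyRange a b 1).filter (fun i => pvDiag pm i ≠ 1)).foldl
      (fun (st : List (List Int) × Int) bd =>
        (st.1 ++ [PySem.List.pyRange st.2 (bd + 1) 1], bd + 1)) (cons, s)).1 := by
  intro a s hs
  by_cases hab : b ≤ a
  · rw [PySem.List.pyRange_one_eq_nil hab]
    simp
  · rw [not_le] at hab
    rw [PySem.List.pyRange_one_cons hab]
    simp only [List.foldl_cons, List.filter_cons]
    rw [pvRange_snoc s a hs]
    by_cases hd : pvDiag pm a = 1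
    · simp only [hd]
      norm_num
      simpa [decide_not] using pvMain (cons := cons) pm b (a + 1) s (by omega)
    · simp only [decide_eq_true_eq, if_neg hd, if_pos hd, List.foldl_cons]
      have h2 : PySem.List.pyRange (a+1) (a+1) 1 = [] := PySem.List.pyRange_one_eq_nil (by omega)
      have := pvMain (cons := cons ++ [PySem.List.pyRange s (a + 1) 1]) pm b (a + 1) (a + 1) (by omega)
      rw [h2] at this
      exact this
termination_by a => (b - a).toNat
decreasing_by all_goals omega

-- ===== VERDICT (by name: the statement is the Claim_ definition above) =====
theorem get_constituents_spec : Claim_equal_get_constituents := by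
  intro pm al _ _
  unfold Spec_get_constituents get_constituents get_constituents_alt
  have := pvMain (cons := []) pm (al.length : Int) 0 0 le_rfl
  rw [PySem.List.pyRange_one_eq_nil (le_refl 0)] at this
  simpa using this
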